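-- pv_equiv track=rewrite | github.com/unixenon/ipv6-rib-mapping | Map IPv6 Prefixes.py | read_pairs_from_msb
-- ===== SOURCE A (Python) =====
-- def read_pairs_from_msb(x, total_bits=128, read_bits=32):
--     if read_bits % 2 != 0:
--         raise ValueError("read_bits must be a multiple of 2")
--
--     pairs = []
--     start = total_bits - 2
--     end = total_bits - read_bits
--
--     for shift in range(start, end - 1, -2):
--         pair = (x >> shift) & 0b11
--         pairs.append(pair)
--
--     return pairs
-- ===== SOURCE B (Python) =====
-- def read_pairs_from_msb(x, total_bits=128, read_bits=32):
--     if read_bits % 2 != 0: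
--         raise ValueError("read_bits must be a multiple of 2")
--     n = read_bits // 2
--     if n <= 0:
--         return []
--     y = x >> (total_bits - read_bits)
--     pairs = []
--     for _ in range(n):
--         pairs.append(y & 3)
--         y >>= 2
--     return pairs[::-1]
-- ===== Notes on version B (the rewrite author's own statement) =====
-- stated objective: alternative
-- what changed: B shifts the read_bits window down once and then peels the 2-bit groups off the low end of a single running value (y & 3; y >>= 2), reversing at the end, instead of A's per-element shift of the full x by a descending range of shift amounts.
-- outside the precondition, e.g. on read_pairs_from_msb(5, 4, 8): A raises ValueError, B raises ValueError; on read_pairs_from_msb(5, 8, 3): A raises ValueError, B raises ValueError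
import Mathlib
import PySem

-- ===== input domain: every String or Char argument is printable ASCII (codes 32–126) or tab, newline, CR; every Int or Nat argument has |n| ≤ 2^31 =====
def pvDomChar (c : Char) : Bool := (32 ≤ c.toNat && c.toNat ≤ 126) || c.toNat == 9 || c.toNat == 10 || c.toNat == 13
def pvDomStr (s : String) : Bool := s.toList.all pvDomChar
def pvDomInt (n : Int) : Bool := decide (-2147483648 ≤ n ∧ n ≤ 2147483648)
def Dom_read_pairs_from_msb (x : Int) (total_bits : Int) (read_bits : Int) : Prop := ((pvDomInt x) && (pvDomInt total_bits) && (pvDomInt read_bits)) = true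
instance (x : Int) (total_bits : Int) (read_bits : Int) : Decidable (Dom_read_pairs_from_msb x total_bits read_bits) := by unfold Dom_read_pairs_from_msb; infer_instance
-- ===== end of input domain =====

-- B replaces A's per-element shifts of x by descending amounts with one window shift
-- followed by peeling 2-bit groups off the low end and reversing (alternative decomposition).


-- ===== PORT A =====
-- Python's '>>' (arithmetic right shift) with a Nat count, pinned to the Int-by-Nat instance
def pyShr (a : Int) (k : Nat) : Int := a >>> k

-- 'x >> shift' is '>>>' on Int with a Nat count; shift.toNat is exact since Pre_ keeps
-- every shift in the range nonnegative (Python raises ValueError on a negative shift).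
def read_pairs_from_msb (x : Int) (total_bits : Int) (read_bits : Int) : List Int :=
  let start := total_bits - 2
  let endv := total_bits - read_bits
  (PySem.List.pyRange start (endv - 1) (-2)).foldl
    (fun pairs shift => pairs ++ [Int.land (pyShr x shift.toNat) 3]) []

-- ===== PORT B =====
-- the 'for _ in range(n): pairs.append(y & 3); y >>= 2' loop, recursing on the count
def readPairsLoop (y : Int) (n : Nat) (acc : List Int) : List Int :=
  match n with
  | 0 => acc
  | Nat.succ m => readPairsLoop (pyShr y 2) m (acc ++ [Int.land y 3])

-- '(total_bits - read_bits).toNat' is exact: when the loop runs (n > 0, so read_bits ≥ 2),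
-- Pre_ guarantees total_bits - read_bits ≥ 0 (Python raises ValueError otherwise);
-- 'pairs[::-1]' is List.reverse (PySem.List.slice?_none_none_neg_one).
def read_pairs_from_msb_alt (x : Int) (total_bits : Int) (read_bits : Int) : List Int :=
  let n := PySem.Int.floordiv read_bits 2
  if n ≤ 0 then []
  else (readPairsLoop (pyShr x (total_bits - read_bits).toNat) n.toNat []).reverse

-- ===== PRECONDITION & SPEC =====
-- Pre_ excludes exactly the inputs where Python A raises ValueError: odd read_bits
-- (explicit raise), and read_bits ≥ 2 with read_bits > total_bits (negative shift count).
def Pre_read_pairs_from_msb (x : Int) (total_bits : Int) (read_bits : Int) : Prop :=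
  read_bits % 2 = 0 ∧ (read_bits < 2 ∨ read_bits ≤ total_bits)
instance (x : Int) (total_bits : Int) (read_bits : Int) : Decidable (Pre_read_pairs_from_msb x total_bits read_bits) := by unfold Pre_read_pairs_from_msb; infer_instance
def pvWitness_read_pairs_from_msb : Int × Int × Int := (23, 8, 6)

def Spec_read_pairs_from_msb (x : Int) (total_bits : Int) (read_bits : Int) (out : List Int) : Prop := out = read_pairs_from_msb_alt x total_bits read_bits
instance (x : Int) (total_bits : Int) (read_bits : Int) (out : List Int) : Decidable (Spec_read_pairs_from_msb x total_bits read_bits out) := by unfold Spec_read_pairs_from_msb; infer_instance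

-- ===== CLAIM (what is proved, stated in full; the proofs are below) =====
def Claim_equal_read_pairs_from_msb : Prop := ∀ (x : Int) (total_bits : Int) (read_bits : Int), Dom_read_pairs_from_msb x total_bits read_bits → Pre_read_pairs_from_msb x total_bits read_bits → Spec_read_pairs_from_msb x total_bits read_bits (read_pairs_from_msb x total_bits read_bits)

-- ===== LEMMAS AND PROOFS =====

-- appending-fold builds the map
theorem foldl_append_map {α β : Type} (f : α → β) (l : List α) (acc : List β) :
    l.foldl (fun pairs s => pairs ++ [f s]) acc = acc ++ l.map f := by
  induction l generalizing acc with
  | nil => simp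
  | cons a t ih => simp [List.foldl, ih]

-- B's loop builds acc ++ [y&3, (y>>2)&3, …]
theorem readPairsLoop_eq (y : Int) (n : Nat) (acc : List Int) :
    readPairsLoop y n acc
      = acc ++ (List.range n).map (fun k : Nat => Int.land (pyShr y (2 * k)) 3) := by
  induction n generalizing y acc with
  | zero => simp [readPairsLoop]
  | succ m ih =>
      rw [readPairsLoop, ih, List.range_succ_eq_map, List.map_cons, List.map_map]
      simp only [List.append_assoc, List.singleton_append]
      congr 2
      · simp [pyShr]
      · apply List.map_congr_left
        intro k _
        simp only [Function.comp_apply]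
        unfold pyShr
        rw [← Int.shiftRight_add]
        congr 2
        omega

theorem read_pairs_from_msb_spec : Claim_equal_read_pairs_from_msb := by
  intro x tb rb _ hpre
  obtain ⟨heven, hcase⟩ := hpre
  unfold Spec_read_pairs_from_msb read_pairs_from_msb read_pairs_from_msb_alt
  dsimp only
  by_cases hsmall : rb < 2
  · -- read_bits ≤ 0 (even and < 2): both sides empty
    have h1 : ¬ (tb - rb - 1 < tb - 2) := by omega
    have h2 : PySem.Int.floordiv rb 2 ≤ 0 := by
      rw [PySem.Int.floordiv_eq_ediv_of_pos (by omega)]; omega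
    rw [if_pos h2]
    unfold PySem.List.pyRange
    dsimp only
    rw [if_neg (by norm_num), if_neg (by norm_num), if_neg h1]
    simp
  · -- read_bits ≥ 2 and ≤ total_bits
    have hrb2 : 2 ≤ rb := by omega
    have htb : rb ≤ tb := by omega
    set n : Nat := (rb / 2).toNat with hn
    have hrbn : rb = 2 * (n : Int) := by omega
    have hfd : PySem.Int.floordiv rb 2 = (n : Int) := by
      rw [PySem.Int.floordiv_eq_ediv_of_pos (by omega)]; omega
    have hlt : tb - rb - 1 < tb - 2 := by omega
    have harg : tb - 2 - (tb - rb - 1) + - -2 - 1 = rb := by ring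
    have hcount : ((tb - 2 - (tb - rb - 1) + - -2 - 1) / - -2).toNat = n := by
      rw [harg, show - -(2 : Int) = 2 by norm_num]
    have hA : PySem.List.pyRange (tb - 2) (tb - rb - 1) (-2)
        = (List.range n).map (fun k : Nat => tb - 2 + -2 * (k : Int)) := by
      unfold PySem.List.pyRange
      dsimp only
      rw [if_neg (by norm_num), if_neg (by norm_num), if_pos hlt, hcount]
    rw [hfd, if_neg (by omega), Int.toNat_natCast, hA, List.foldl_map,
      foldl_append_map, readPairsLoop_eq, List.nil_append, List.nil_append]
    apply List.ext_getElem
    · simp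
    · intro i h1 h2
      have hi : i < n := by simpa using h1
      rw [List.getElem_reverse]
      simp only [List.getElem_map, List.getElem_range, List.length_map, List.length_range]
      congr 1
      unfold pyShr
      rw [← Int.shiftRight_add]
      congr 1
      omega

-- ===== VERDICT (by name: the statement is the Claim_ definition above) =====
-- (the verdict theorem above is the only theorem; stated directly)
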